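-- pv_equiv track=rewrite | github.com/and150/readMoreResults | readgrd.py | get_null_ranges
-- ===== SOURCE A (Python) =====
-- def get_null_ranges(rvol_array):
--     gap_indexes ={}
--     prev_item = -999
--     gap_start = False
--     i, n = 0, 0
--     for item in rvol_array:
--         if item ==0 and prev_item !=0:
--             gap_start = True
--         if item !=0 and prev_item ==0:
--             gap_start = False
--             gap_indexes.update({i-n:n})
--             n = 0
--         if gap_start == True:
--             n+=1
--         i+=1
--         prev_item = item
--     return gap_indexes
-- ===== SOURCE B (Python) =====
-- def get_null_ranges(rvol_array):
--     # Run-length encode the array by zero-ness, then emit each zero run's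
--     # (start, length) except the final run (A never records a trailing zero run).
--     runs = []
--     for x in rvol_array:
--         z = (x == 0)
--         if runs and runs[-1][0] == z:
--             runs[-1] = (z, runs[-1][1] + 1)
--         else:
--             runs.append((z, 1))
--     out = {}
--     pos = 0
--     for idx, (z, ln) in enumerate(runs):
--         if z and idx != len(runs) - 1:
--             out[pos] = ln
--         pos += ln
--     return out
-- ===== Notes on version B (the rewrite author's own statement) =====
-- stated objective: alternative
-- what changed: B replaces A's flag/counter state machine by a two-phase pipeline: run-length encode the array by zero-ness, then emit start/length for every zero run except the final run (reproducing A's behaviour of never recording a trailing zero run).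
import Mathlib
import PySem

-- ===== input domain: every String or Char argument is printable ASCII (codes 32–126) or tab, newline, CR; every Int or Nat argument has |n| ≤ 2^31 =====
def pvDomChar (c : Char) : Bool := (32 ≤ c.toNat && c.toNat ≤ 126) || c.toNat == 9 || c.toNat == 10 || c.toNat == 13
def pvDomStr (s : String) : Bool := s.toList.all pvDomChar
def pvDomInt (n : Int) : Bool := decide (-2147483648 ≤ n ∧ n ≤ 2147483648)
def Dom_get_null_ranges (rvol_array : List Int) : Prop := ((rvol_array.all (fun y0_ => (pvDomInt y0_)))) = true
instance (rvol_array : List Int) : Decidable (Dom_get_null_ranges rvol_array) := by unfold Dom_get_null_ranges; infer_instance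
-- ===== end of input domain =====

-- B replaces A's flag/counter state machine by run-length encoding followed by an
-- emission pass that records every zero run except the final run (same values as A).

-- ===== PORT A =====
-- one iteration of A's for-loop; state = (gap_indexes, prev_item, gap_start, i, n)
def aStep (st : PySem.Dict Int Int × Int × Bool × Int × Int) (item : Int) :
    PySem.Dict Int Int × Int × Bool × Int × Int :=
  let d := st.1
  let prev := st.2.1
  let gs := st.2.2.1
  let i := st.2.2.2.1
  let n := st.2.2.2.2
  let gs := if item = 0 ∧ prev ≠ 0 then true else gs
  let (gs, d, n) :=
    if item ≠ 0 ∧ prev = 0 then (false, d.insert (i - n) n, (0 : Int)) else (gs, d, n)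
  let n := if gs = true then n + 1 else n
  (d, item, gs, i + 1, n)

def get_null_ranges (rvol_array : List Int) : List (Int × Int) :=
  (rvol_array.foldl aStep (PySem.Dict.empty, -999, false, 0, 0)).1.items

-- ===== PORT B =====
-- B phase 1: run-length encode by zero-ness (mirrors Source B's first loop on runs[-1])
def bAddRun (acc : List (Bool × Int)) (x : Int) : List (Bool × Int) :=
  let z := decide (x = 0)
  match acc.getLast? with
  | some (b, k) => if b = z then acc.dropLast ++ [(z, k + 1)] else acc ++ [(z, 1)]
  | none => [(z, 1)]

def bRuns (xs : List Int) : List (Bool × Int) := xs.foldl bAddRun []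

-- B phase 2: one step of the emission loop over enumerate(runs); state = (out, pos)
def bEmitStep (L : Int) (st : PySem.Dict Int Int × Int) (p : Int × (Bool × Int)) :
    PySem.Dict Int Int × Int :=
  let out := if p.2.1 = true ∧ p.1 ≠ L - 1 then st.1.insert st.2 p.2.2 else st.1
  (out, st.2 + p.2.2)

def get_null_ranges_alt (rvol_array : List Int) : List (Int × Int) :=
  let runs := bRuns rvol_array
  ((PySem.List.enumerate runs).foldl (bEmitStep (runs.length : Int))
    (PySem.Dict.empty, 0)).1.items

-- ===== PRECONDITION & SPEC =====
def Spec_get_null_ranges (rvol_array : List Int) (out : List (Int × Int)) : Prop := out = get_null_ranges_alt rvol_array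
instance (rvol_array : List Int) (out : List (Int × Int)) : Decidable (Spec_get_null_ranges rvol_array out) := by unfold Spec_get_null_ranges; infer_instance

-- ===== CLAIM (what is proved, stated in full; the proofs are below) =====
def Claim_equal_get_null_ranges : Prop := ∀ (rvol_array : List Int), Dom_get_null_ranges rvol_array → Spec_get_null_ranges rvol_array (get_null_ranges rvol_array)

-- ===== LEMMAS AND PROOFS =====

-- reference emitter: record every zero run except the last run
def emitRec (pos : Int) : List (Bool × Int) → List (Int × Int)
  | [] => []
  | [_] => []
  | r :: s :: t => (if r.1 then [(pos, r.2)] else []) ++ emitRec (pos + r.2) (s :: t)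

def sumLen (rs : List (Bool × Int)) : Int := (rs.map (·.2)).sum

theorem sumLen_append (a b : List (Bool × Int)) : sumLen (a ++ b) = sumLen a + sumLen b := by
  simp [sumLen]

-- the emitted pairs are independent of the last run
theorem emitRec_last_irrel (ts : List (Bool × Int)) (pos : Int) (s s' : Bool × Int) :
    emitRec pos (ts ++ [s]) = emitRec pos (ts ++ [s']) := by
  induction ts generalizing pos with
  | nil => simp [emitRec]
  | cons r tail ih =>
    cases tail with
    | nil => simp [emitRec]
    | cons a u =>
      simp only [List.cons_append] at ih ⊢
      simp only [emitRec]
      rw [ih]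

-- appending a run after last run r emits r (if it is a zero run)
theorem emitRec_append (ts : List (Bool × Int)) (pos : Int) (r s : Bool × Int) :
    emitRec pos ((ts ++ [r]) ++ [s]) =
      emitRec pos (ts ++ [r]) ++ (if r.1 then [(pos + sumLen ts, r.2)] else []) := by
  induction ts generalizing pos with
  | nil => simp [emitRec, sumLen]
  | cons a tail ih =>
    cases tail with
    | nil =>
      simp only [List.cons_append, List.nil_append, List.append_assoc, emitRec, sumLen,
        List.map_cons, List.map_nil, List.sum_cons, List.sum_nil]
      split <;> split <;> simp
    | cons b u =>
      simp only [List.cons_append, List.append_assoc, List.nil_append] at ih ⊢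
      simp only [emitRec]
      rw [ih]
      simp [sumLen, add_assoc]

theorem sumLen_nonneg (rs : List (Bool × Int)) (h : ∀ r ∈ rs, 1 ≤ r.2) : 0 ≤ sumLen rs := by
  induction rs with
  | nil => simp [sumLen]
  | cons r t ih =>
    have h1 := h r (by simp)
    have h2 : 0 ≤ sumLen t := ih (fun q hq => h q (by simp [hq]))
    simp only [sumLen, List.map_cons, List.sum_cons] at *
    omega

-- every emitted key is below pos + sumLen of all runs but the last
theorem emitRec_key_lt (rs : List (Bool × Int)) (pos : Int)
    (h : ∀ r ∈ rs, 1 ≤ r.2) :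
    ∀ p ∈ emitRec pos rs, p.1 < pos + sumLen rs.dropLast := by
  induction rs generalizing pos with
  | nil => simp [emitRec]
  | cons r tail ih =>
    cases tail with
    | nil => simp [emitRec]
    | cons s t =>
      intro p hp
      have hr1 : 1 ≤ r.2 := h r (by simp)
      have hd : (r :: s :: t).dropLast = r :: (s :: t).dropLast := by simp
      rw [hd]
      have hnn : 0 ≤ sumLen (s :: t).dropLast := by
        apply sumLen_nonneg
        intro q hq
        exact h q (List.mem_cons_of_mem _ ((List.dropLast_sublist (s :: t)).subset hq))
      simp only [sumLen] at hnn
      simp only [emitRec, List.mem_append] at hp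
      rcases hp with hp | hp
      · by_cases hb : r.1 = true
        · simp only [hb, if_true, List.mem_singleton] at hp
          rw [hp]
          simp only [sumLen, List.map_cons, List.sum_cons]
          omega
        · simp [hb] at hp
      · have := ih (pos + r.2) (fun q hq => h q (List.mem_cons_of_mem _ hq)) p hp
        simp only [sumLen, List.map_cons, List.sum_cons] at this ⊢
        omega

theorem key_lt_not_contains (d : PySem.Dict Int Int) (k : Int)
    (h : ∀ p ∈ d.items, p.1 < k) : d.contains k = false := by
  rw [PySem.Dict.contains_eq_decide_mem_keys]
  simp only [decide_eq_false_iff_not]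
  intro hk
  have : k ∈ d.items.map (·.1) := hk
  rcases List.mem_map.mp this with ⟨p, hp, hpk⟩
  have := h p hp
  omega

-- B's emission fold computes emitRec
theorem emit_fold (L : Int) (rs : List (Bool × Int)) (j : Nat)
    (out : PySem.Dict Int Int) (pos : Int)
    (hL : (j : Int) + rs.length = L)
    (hkeys : ∀ p ∈ out.items, p.1 < pos)
    (hlen : ∀ r ∈ rs, 1 ≤ r.2) :
    ((PySem.List.enumerate rs (j : Int)).foldl (bEmitStep L) (out, pos)).1.items =
      out.items ++ emitRec pos rs := by
  induction rs generalizing j out pos with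
  | nil => simp [PySem.List.enumerate_nil, emitRec]
  | cons r tail ih =>
    rw [PySem.List.enumerate_cons]
    cases tail with
    | nil =>
      have hj : (j : Int) = L - 1 := by simp at hL; omega
      simp [bEmitStep, hj, emitRec, PySem.List.enumerate_nil]
    | cons s t =>
      have hj : (j : Int) ≠ L - 1 := by simp at hL; omega
      have hr1 : 1 ≤ r.2 := hlen r (by simp)
      simp only [List.foldl_cons, bEmitStep]
      have hlen' : ∀ q ∈ s :: t, 1 ≤ q.2 := fun q hq => hlen q (by simp [hq])
      have hL' : ((j + 1 : Nat) : Int) + (s :: t).length = L := by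
        simp at hL ⊢; omega
      have hcast : ((j : Int) + 1) = ((j + 1 : Nat) : Int) := by push_cast; ring
      by_cases hz : r.1 = true
      · have hfresh : out.contains pos = false := key_lt_not_contains out pos hkeys
        rw [if_pos ⟨hz, hj⟩, hcast, ih (j + 1) (out.insert pos r.2) (pos + r.2) hL' ?_ hlen']
        · rw [PySem.Dict.items_insert_of_not_contains _ _ hfresh]
          simp [emitRec, hz]
        · intro p hp
          rw [PySem.Dict.items_insert_of_not_contains _ _ hfresh] at hp
          simp only [List.mem_append, List.mem_singleton] at hp
          rcases hp with hp | rfl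
          · have := hkeys p hp; omega
          · simp; omega
      · rw [if_neg (by simp [hz]), hcast, ih (j + 1) out (pos + r.2) hL' ?_ hlen']
        · simp [emitRec, hz]
        · intro p hp; have := hkeys p hp; omega

-- gap_start / n as functions of the run list
def gsOf (rs : List (Bool × Int)) : Bool := (rs.getLast?.map (·.1)).getD false
def nOf (rs : List (Bool × Int)) : Int :=
  match rs.getLast? with
  | some (true, k) => k
  | _ => 0

def aInit : PySem.Dict Int Int × Int × Bool × Int × Int :=
  (PySem.Dict.empty, -999, false, 0, 0)

-- the coupling invariant between A's loop state after ys and B's runs of ys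
def AInv (ys : List Int) : Prop :=
  let rs := bRuns ys
  let st := ys.foldl aStep aInit
  (∀ r ∈ rs, 1 ≤ r.2) ∧
  sumLen rs = (ys.length : Int) ∧
  st.1.items = emitRec 0 rs ∧
  st.2.1 = ys.getLast?.getD (-999) ∧
  rs.getLast?.map (·.1) = ys.getLast?.map (fun x => decide (x = 0)) ∧
  st.2.2.1 = gsOf rs ∧
  st.2.2.2.1 = (ys.length : Int) ∧
  st.2.2.2.2 = nOf rs

theorem inv_holds (ys : List Int) : AInv ys := by
  induction ys using List.reverseRecOn with
  | nil => simp [AInv, bRuns, aInit, emitRec, gsOf, nOf, sumLen, PySem.Dict.empty]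
  | append_singleton ys x IH =>
    obtain ⟨hlen, hsum, hitems, hprev, hlink, hgs, hi, hn⟩ := IH
    have hfa : (ys ++ [x]).foldl aStep aInit = aStep (ys.foldl aStep aInit) x := by
      simp [List.foldl_append]
    have hfb : bRuns (ys ++ [x]) = bAddRun (bRuns ys) x := by
      simp [bRuns, List.foldl_append]
    cases hys : ys.getLast? with
    | none =>
      have hys' : ys = [] := List.getLast?_eq_none_iff.mp hys
      subst hys'
      by_cases hx : x = 0 <;>
        simp [AInv, bRuns, bAddRun, aStep, aInit, emitRec, gsOf, nOf, sumLen, hx, PySem.Dict.empty]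
    | some p =>
      have hys' : ys ≠ [] := by intro h; rw [h] at hys; simp at hys
      cases hrs : (bRuns ys).getLast? with
      | none => rw [hrs, hys] at hlink; simp at hlink
      | some rk =>
        obtain ⟨b, k⟩ := rk
        rw [hrs, hys] at hlink
        simp only [Option.map_some] at hlink
        have hb : b = decide (p = 0) := by
          have := congrArg (fun o => Option.getD o false) hlink
          simpa using this
        have hrsne : bRuns ys ≠ [] := by intro h; rw [h] at hrs; simp at hrs
        have hdecomp : bRuns ys = (bRuns ys).dropLast ++ [(b, k)] := by
          conv_lhs => rw [← List.dropLast_append_getLast hrsne]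
          rw [List.getLast?_eq_some_getLast hrsne] at hrs
          simp only [Option.some.injEq] at hrs
          rw [hrs]
        rw [hys] at hprev
        simp only [Option.getD_some] at hprev
        have hk1 : 1 ≤ k := hlen (b, k) (by rw [hdecomp]; simp)
        have hsumd : sumLen (bRuns ys).dropLast = (ys.length : Int) - k := by
          have h1 := congrArg sumLen hdecomp
          rw [sumLen_append] at h1
          have h2 : sumLen [(b, k)] = k := by simp [sumLen]
          omega
        have hkey : ∀ q ∈ (ys.foldl aStep aInit).1.items, q.1 < (ys.length : Int) - k := by
          rw [hitems]
          intro q hq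
          have h1 := emitRec_key_lt (bRuns ys) 0 hlen q hq
          omega
        have hlend : ∀ r ∈ (bRuns ys).dropLast, 1 ≤ r.2 :=
          fun r hr => hlen r ((List.dropLast_sublist _).subset hr)
        unfold AInv
        rw [hfa, hfb]
        simp only [bAddRun, hrs]
        by_cases hx : x = 0 <;> cases b
        · -- b = false, x = 0 : a new zero run starts
          have hpne : (ys.foldl aStep aInit).2.1 ≠ 0 := by
            rw [hprev]; simp at hb; exact hb
          have hgsf : (ys.foldl aStep aInit).2.2.1 = false := by
            rw [hgs]; simp [gsOf, hrs]
          have hnz : (ys.foldl aStep aInit).2.2.2.2 = 0 := by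
            rw [hn]; simp [nOf, hrs]
          have hstep : aStep (ys.foldl aStep aInit) x =
              ((ys.foldl aStep aInit).1, x, true, (ys.foldl aStep aInit).2.2.2.1 + 1,
                (ys.foldl aStep aInit).2.2.2.2 + 1) := by
            simp [aStep, hx, hpne]
          rw [hstep]
          simp only [hx, decide_true]
          rw [if_neg (by simp)]
          refine ⟨?_, ?_, ?_, ?_, ?_, ?_, ?_, ?_⟩
          · intro r hr
            rcases List.mem_append.mp hr with hr | hr
            · exact hlen r hr
            · rw [List.mem_singleton] at hr; rw [hr]
          · rw [sumLen_append]
            have h2 : sumLen [(true, (1 : Int))] = 1 := by simp [sumLen]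
            simp only [List.length_append, List.length_singleton]
            push_cast
            omega
          · rw [hitems]
            conv_rhs => rw [hdecomp]
            rw [emitRec_append, ← hdecomp]
            simp
          · simp
          · simp
          · simp [gsOf]
          · simp only [List.length_append, List.length_singleton]
            push_cast
            omega
          · simp [nOf, hnz]
        · -- b = true, x = 0 : the zero run continues
          have hp0 : (ys.foldl aStep aInit).2.1 = 0 := by
            rw [hprev]; simpa using (of_decide_eq_true hb.symm)
          have hgst : (ys.foldl aStep aInit).2.2.1 = true := by
            rw [hgs]; simp [gsOf, hrs]
          have hnk : (ys.foldl aStep aInit).2.2.2.2 = k := by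
            rw [hn]; simp [nOf, hrs]
          have hstep : aStep (ys.foldl aStep aInit) x =
              ((ys.foldl aStep aInit).1, x, true, (ys.foldl aStep aInit).2.2.2.1 + 1,
                (ys.foldl aStep aInit).2.2.2.2 + 1) := by
            simp [aStep, hx, hp0, hgst]
          rw [hstep]
          simp only [hx, decide_true]
          rw [if_pos (by trivial)]
          refine ⟨?_, ?_, ?_, ?_, ?_, ?_, ?_, ?_⟩
          · intro r hr
            rcases List.mem_append.mp hr with hr | hr
            · exact hlend r hr
            · rw [List.mem_singleton] at hr; rw [hr]; show (1 : Int) ≤ k + 1; omega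
          · rw [sumLen_append]
            have h2 : sumLen [(true, k + 1)] = k + 1 := by simp [sumLen]
            simp only [List.length_append, List.length_singleton]
            push_cast
            omega
          · rw [hitems]
            conv_lhs => rw [hdecomp]
            exact emitRec_last_irrel _ _ _ _
          · simp
          · simp
          · simp [gsOf]
          · simp only [List.length_append, List.length_singleton]
            push_cast
            omega
          · simp [nOf, hnk]
        · -- b = false, x ≠ 0 : the nonzero run continues
          have hpne : (ys.foldl aStep aInit).2.1 ≠ 0 := by
            rw [hprev]; simp at hb; exact hb
          have hgsf : (ys.foldl aStep aInit).2.2.1 = false := by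
            rw [hgs]; simp [gsOf, hrs]
          have hnz : (ys.foldl aStep aInit).2.2.2.2 = 0 := by
            rw [hn]; simp [nOf, hrs]
          have hstep : aStep (ys.foldl aStep aInit) x =
              ((ys.foldl aStep aInit).1, x, false, (ys.foldl aStep aInit).2.2.2.1 + 1,
                (ys.foldl aStep aInit).2.2.2.2) := by
            simp [aStep, hx, hpne, hgsf]
          rw [hstep]
          simp only [hx, decide_false]
          rw [if_pos (by trivial)]
          refine ⟨?_, ?_, ?_, ?_, ?_, ?_, ?_, ?_⟩
          · intro r hr
            rcases List.mem_append.mp hr with hr | hr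
            · exact hlend r hr
            · rw [List.mem_singleton] at hr; rw [hr]; show (1 : Int) ≤ k + 1; omega
          · rw [sumLen_append]
            have h2 : sumLen [(false, k + 1)] = k + 1 := by simp [sumLen]
            simp only [List.length_append, List.length_singleton]
            push_cast
            omega
          · rw [hitems]
            conv_lhs => rw [hdecomp]
            exact emitRec_last_irrel _ _ _ _
          · simp
          · simp [hx]
          · simp [gsOf]
          · simp only [List.length_append, List.length_singleton]
            push_cast
            omega
          · simp [nOf, hnz]
        · -- b = true, x ≠ 0 : the zero run ends and is recorded
          have hp0 : (ys.foldl aStep aInit).2.1 = 0 := by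
            rw [hprev]; simpa using (of_decide_eq_true hb.symm)
          have hnk : (ys.foldl aStep aInit).2.2.2.2 = k := by
            rw [hn]; simp [nOf, hrs]
          have hstep : aStep (ys.foldl aStep aInit) x =
              ((ys.foldl aStep aInit).1.insert
                  ((ys.foldl aStep aInit).2.2.2.1 - (ys.foldl aStep aInit).2.2.2.2)
                  (ys.foldl aStep aInit).2.2.2.2,
                x, false, (ys.foldl aStep aInit).2.2.2.1 + 1, 0) := by
            simp [aStep, hx, hp0]
          rw [hstep]
          simp only [hx, decide_false]
          rw [if_neg (by simp)]
          have hfresh : (ys.foldl aStep aInit).1.contains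
              ((ys.foldl aStep aInit).2.2.2.1 - (ys.foldl aStep aInit).2.2.2.2) = false := by
            apply key_lt_not_contains
            intro q hq
            have h1 := hkey q hq
            rw [hi, hnk]
            omega
          refine ⟨?_, ?_, ?_, ?_, ?_, ?_, ?_, ?_⟩
          · intro r hr
            rcases List.mem_append.mp hr with hr | hr
            · exact hlen r hr
            · rw [List.mem_singleton] at hr; rw [hr]
          · rw [sumLen_append]
            have h2 : sumLen [(false, (1 : Int))] = 1 := by simp [sumLen]
            simp only [List.length_append, List.length_singleton]
            push_cast
            omega
          · rw [PySem.Dict.items_insert_of_not_contains _ _ hfresh, hitems]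
            conv_rhs => rw [hdecomp]
            rw [emitRec_append, ← hdecomp]
            rw [hi, hnk, hsumd]
            norm_num
          · simp
          · simp [hx]
          · simp [gsOf]
          · simp only [List.length_append, List.length_singleton]
            push_cast
            omega
          · simp [nOf]


-- ===== VERDICT (by name: the statement is the Claim_ definition above) =====
theorem get_null_ranges_spec : Claim_equal_get_null_ranges := by
  intro xs _
  unfold Spec_get_null_ranges
  obtain ⟨hlen, hsum, hitems, -⟩ := inv_holds xs
  have hB : get_null_ranges_alt xs = emitRec 0 (bRuns xs) := by
    unfold get_null_ranges_alt
    have := emit_fold ((bRuns xs).length : Int) (bRuns xs) 0 PySem.Dict.empty 0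
      (by simp) (by simp [PySem.Dict.empty]) hlen
    simpa [PySem.Dict.empty] using this
  unfold get_null_ranges
  rw [hB]
  exact hitems
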